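-- pv_equiv track=rewrite | github.com/okodeee/Algorithm | hw3+정윤지+2020105659.py | prod2
-- ===== SOURCE A (Python) =====
-- def prod2(largeint1, largeint2):
--     """Returns the value multiplied by the divider and conquer method
--
--     largeint1 = x * 10**m + y, largeint2 = w * 10**m + z
--     largeint1 * largeint2 = xw * 10**2m + (xz + wy) * 10**m + yz
--     r = (x + y) * (w + z) = xw + (xz + yw) + yz
--     xz + yw = r - xw - yz
--
--     Args:
--         largeint1 (int): First number to multiply
--         largeint2 (int): Second number to multiply
--
--     Returns:
--         int: Multiplied value of 'largeint1' and 'largeint2'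
--     """
--     n = len(str(largeint1))
--     if (largeint1 == 0 or largeint2 == 0): return 0
--     elif (n <= 2): return largeint1 * largeint2
--     else:
--         m = n // 2
--         x = largeint1 // 10**m
--         y = largeint1 % 10**m
--         w = largeint2 // 10**m
--         z = largeint2 % 10**m
--         r = prod2(x + y, w + z)
--         p = prod2(x, w)
--         q = prod2(y, z)
--         return p * 10**(2*m) + (r - p - q) * 10**m + q
-- ===== SOURCE B (Python) =====
-- def prod2(largeint1, largeint2):
--     """Product of the two integers by Russian-peasant (binary) multiplication:
--     accumulate largeint1 shifted for each set bit of |largeint2|, then fix the sign.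
--     No string-length splitting, no recursion."""
--     neg = largeint2 < 0
--     n = -largeint2 if neg else largeint2
--     addend = largeint1
--     acc = 0
--     while n > 0:
--         if n & 1:
--             acc += addend
--         addend += addend
--         n >>= 1
--     return -acc if neg else acc
-- ===== Notes on version B (the rewrite author's own statement) =====
-- stated objective: alternative
-- what changed: Replaces the three-way recursive Karatsuba decomposition (string-length splitting, floor div/mod, recombination) with an iterative Russian-peasant binary multiplication over the bits of the second factor.
import Mathlib
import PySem

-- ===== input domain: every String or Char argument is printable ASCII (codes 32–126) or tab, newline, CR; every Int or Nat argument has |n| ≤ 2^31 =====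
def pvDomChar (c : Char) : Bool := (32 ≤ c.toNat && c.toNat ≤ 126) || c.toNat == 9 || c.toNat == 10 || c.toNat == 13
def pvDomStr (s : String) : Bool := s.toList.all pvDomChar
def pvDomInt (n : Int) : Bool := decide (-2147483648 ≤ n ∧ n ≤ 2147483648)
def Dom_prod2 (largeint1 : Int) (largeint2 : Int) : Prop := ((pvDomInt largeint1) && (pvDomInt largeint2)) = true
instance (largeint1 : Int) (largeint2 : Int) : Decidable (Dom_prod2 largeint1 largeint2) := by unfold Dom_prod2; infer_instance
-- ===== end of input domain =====

-- ===== PORT A =====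
-- One honest line: B replaces A's recursive Karatsuba decomposition by an iterative
-- Russian-peasant binary multiplication over the bits of the second factor (both exact on all integers).

-- Port of A. Python's  n = len(str(largeint1))  is ported as the length of
-- PySem.Int.toChars largeint1 (toStr is String.ofList of toChars, same length).
-- The fuel parameter only makes the recursion structurally total: every recursive
-- call strictly decreases |largeint1| (theorem prod2_dec below), so the initial
-- fuel |largeint1| + 1 is never exhausted and the 0-fuel arm is never reached.
def prod2Go (fuel : Nat) (largeint1 : Int) (largeint2 : Int) : Int :=
  match fuel with
  | 0 => 0
  | fuel + 1 =>
    let n := (PySem.Int.toChars largeint1).length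
    if largeint1 = 0 ∨ largeint2 = 0 then 0
    else if n ≤ 2 then largeint1 * largeint2
    else
      let m := n / 2
      let x := PySem.Int.floordiv largeint1 (10 ^ m)
      let y := PySem.Int.mod largeint1 (10 ^ m)
      let w := PySem.Int.floordiv largeint2 (10 ^ m)
      let z := PySem.Int.mod largeint2 (10 ^ m)
      let r := prod2Go fuel (x + y) (w + z)
      let p := prod2Go fuel x w
      let q := prod2Go fuel y z
      p * 10 ^ (2 * m) + (r - p - q) * 10 ^ m + q

def prod2 (largeint1 : Int) (largeint2 : Int) : Int :=
  prod2Go (largeint1.natAbs + 1) largeint1 largeint2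

-- ===== PORT B =====
-- Loop of Source B: while n > 0: if n & 1: acc += addend; addend += addend; n >>= 1.
-- n is |largeint2| (nonnegative), so n & 1 is n % 2 and n >> 1 is n / 2 on Nat.
def prod2AltGo (addend : Int) (n : Nat) (acc : Int) : Int :=
  if h : n = 0 then acc
  else prod2AltGo (addend + addend) (n / 2) (if n % 2 = 1 then acc + addend else acc)
decreasing_by exact Nat.div_lt_self (Nat.pos_of_ne_zero h) one_lt_two

def prod2_alt (largeint1 : Int) (largeint2 : Int) : Int :=
  let neg := largeint2 < 0
  let n := largeint2.natAbs
  let acc := prod2AltGo largeint1 n 0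
  if neg then -acc else acc

-- ===== PRECONDITION & SPEC =====
def Spec_prod2 (largeint1 : Int) (largeint2 : Int) (out : Int) : Prop := out = prod2_alt largeint1 largeint2
instance (largeint1 : Int) (largeint2 : Int) (out : Int) : Decidable (Spec_prod2 largeint1 largeint2 out) := by unfold Spec_prod2; infer_instance

-- ===== CLAIM (what is proved, stated in full; the proofs are below) =====
def Claim_equal_prod2 : Prop := ∀ (largeint1 : Int) (largeint2 : Int), Dom_prod2 largeint1 largeint2 → Spec_prod2 largeint1 largeint2 (prod2 largeint1 largeint2)

-- ===== LEMMAS AND PROOFS =====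

theorem prod2_dec (a : Int) (h : ¬ (PySem.Int.toChars a).length ≤ 2) :
    (PySem.Int.floordiv a (10 ^ ((PySem.Int.toChars a).length / 2))).natAbs < a.natAbs ∧
    (PySem.Int.mod a (10 ^ ((PySem.Int.toChars a).length / 2))).natAbs < a.natAbs ∧
    (PySem.Int.floordiv a (10 ^ ((PySem.Int.toChars a).length / 2)) +
      PySem.Int.mod a (10 ^ ((PySem.Int.toChars a).length / 2))).natAbs < a.natAbs := by
  push_neg at h
  set L := (PySem.Int.toChars a).length with hL
  set m := L / 2 with hm
  set t : Int := 10 ^ m with ht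
  have ht0 : (0:ℤ) < t := by positivity
  have ht10 : (10:ℤ) ≤ t := by
    calc (10:ℤ) = 10 ^ 1 := by ring
    _ ≤ 10 ^ m := by apply pow_le_pow_right₀ (by norm_num); omega
  have ha := PySem.Int.floordiv_mul_add_mod a t
  have hy0 := PySem.Int.mod_nonneg a ht0
  have hyt := PySem.Int.mod_lt a ht0
  set x := PySem.Int.floordiv a t with hx
  set y := PySem.Int.mod a t with hy
  by_cases hneg : a < 0
  · -- negative: toChars a = '-' :: toDigits 10 a.natAbs
    have hLc : L = (Nat.toDigits 10 a.natAbs).length + 1 := by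
      rw [hL, PySem.Int.toChars, if_pos hneg]; simp
    have hN10 : 10 ≤ a.natAbs := by
      by_contra hc
      have := Nat.toDigits_length 10 a.natAbs 1 (by norm_num) (by omega)
      omega
    have hNbig : 10 ^ (L - 2) ≤ a.natAbs := by
      by_contra hc
      have := Nat.toDigits_length 10 a.natAbs (L - 2) (by omega) (by omega)
      omega
    have htN : t ≤ -a := by
      have h1 : (10:ℤ) ^ m ≤ 10 ^ (L - 2) := by
        apply pow_le_pow_right₀ (by norm_num); omega
      have h2 : ((10:ℕ) ^ (L - 2) : ℤ) ≤ (a.natAbs : ℤ) := by exact_mod_cast hNbig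
      push_cast at h2
      have habs : |a| = -a := abs_of_neg hneg
      rw [ht]
      linarith
    have ha10 : a ≤ -10 := by omega
    have hxneg : x < 0 := by
      by_contra hc
      push_neg at hc
      nlinarith [mul_nonneg hc (le_of_lt ht0)]
    have hax : a < x := by
      by_contra hc
      push_neg at hc
      have h1 : x * t ≤ a * t := mul_le_mul_of_nonneg_right hc (le_of_lt ht0)
      have h2 : a * t ≤ a * 10 := mul_le_mul_of_nonpos_left ht10 (by omega)
      linarith
    refine ⟨by omega, by omega, by omega⟩
  · -- nonnegative
    push_neg at hneg
    have hLc : L = (Nat.toDigits 10 a.toNat).length := by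
      rw [hL, PySem.Int.toChars, if_neg (by omega)]
    have hN100 : 100 ≤ a.toNat := by
      by_contra hc
      have := Nat.toDigits_length 10 a.toNat 2 (by norm_num) (by omega)
      omega
    have hNbig : 10 ^ (L - 1) ≤ a.toNat := by
      by_contra hc
      have := Nat.toDigits_length 10 a.toNat (L - 1) (by omega) (by omega)
      omega
    have h10t : 10 * t ≤ a := by
      have h1 : (10:ℤ) ^ (m + 1) ≤ 10 ^ (L - 1) := by
        apply pow_le_pow_right₀ (by norm_num); omega
      have h2 : ((10:ℕ) ^ (L - 1) : ℤ) ≤ (a.toNat : ℤ) := by exact_mod_cast hNbig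
      have h3 : ((a.toNat : ℤ)) = a := by omega
      push_cast at h2
      have : (10:ℤ) ^ (m + 1) = 10 * t := by rw [ht, pow_succ]; ring
      linarith
    have ha100 : (100:ℤ) ≤ a := by omega
    have hx0 : 0 ≤ x := by
      rw [hx, PySem.Int.floordiv_eq_ediv_of_pos ht0]
      exact Int.ediv_nonneg (by omega) (le_of_lt ht0)
    have h10x : 10 * x ≤ a := by
      have h1 : x * 10 ≤ x * t := mul_le_mul_of_nonneg_left ht10 hx0
      nlinarith
    refine ⟨by omega, by omega, by omega⟩

theorem prod2AltGo_eq (n : Nat) : ∀ (addend acc : Int), prod2AltGo addend n acc = acc + addend * n := by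
  induction n using Nat.strong_induction_on with
  | _ n ih =>
    intro addend acc
    rw [prod2AltGo]
    by_cases h0 : n = 0
    · simp [h0]
    · rw [dif_neg h0, ih (n / 2) (Nat.div_lt_self (by omega) (by omega))]
      have hdm : 2 * (n / 2) + n % 2 = n := Nat.div_add_mod n 2
      have hcast : ((n : Int)) = 2 * ((n / 2 : Nat) : Int) + ((n % 2 : Nat) : Int) := by
        exact_mod_cast hdm.symm
      by_cases h1 : n % 2 = 1
      · rw [if_pos h1, hcast, h1]; push_cast; ring
      · rw [if_neg h1, hcast]
        have : n % 2 = 0 := by omega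
        rw [this]; push_cast; ring

theorem prod2_alt_eq_mul (a b : Int) : prod2_alt a b = a * b := by
  unfold prod2_alt
  simp only []
  rw [prod2AltGo_eq]
  by_cases hb : b < 0
  · have : ((b.natAbs : Int)) = -b := by omega
    rw [if_pos hb, this]; ring
  · have : ((b.natAbs : Int)) = b := by omega
    rw [if_neg hb, this]; ring

theorem prod2Go_eq_mul : ∀ (k : Nat) (a b : Int), a.natAbs < k → prod2Go k a b = a * b := by
    intro k
    induction k with
    | zero => intro a b h; omega
    | succ k ih =>
      intro a b hk
      rw [prod2Go]
      by_cases h0 : a = 0 ∨ b = 0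
      · rw [if_pos h0]
        rcases h0 with h | h <;> simp [h]
      · rw [if_neg h0]
        by_cases hn : (PySem.Int.toChars a).length ≤ 2
        · rw [if_pos hn]
        · rw [if_neg hn]
          simp only []
          obtain ⟨d1, d2, d3⟩ := prod2_dec a hn
          set m := (PySem.Int.toChars a).length / 2 with hm
          set t : Int := 10 ^ m with htdef
          set x := PySem.Int.floordiv a t
          set y := PySem.Int.mod a t
          set w := PySem.Int.floordiv b t
          set z := PySem.Int.mod b t
          rw [ih (x + y) (w + z) (by omega), ih x w (by omega), ih y z (by omega)]
          have ha := PySem.Int.floordiv_mul_add_mod a t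
          have hb := PySem.Int.floordiv_mul_add_mod b t
          have h2m : (10:ℤ) ^ (2 * m) = t * t := by rw [two_mul, pow_add]
          rw [h2m, ← ha, ← hb]
          ring

theorem prod2_eq_mul (a b : Int) : prod2 a b = a * b := by
  unfold prod2
  exact prod2Go_eq_mul (a.natAbs + 1) a b (by omega)

-- ===== VERDICT (by name: the statement is the Claim_ definition above) =====
theorem prod2_spec : Claim_equal_prod2 := by
  intro a b _
  unfold Spec_prod2
  rw [prod2_eq_mul, prod2_alt_eq_mul]
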